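-- pv_equiv track=rewrite | github.com/rvdweerd/aoc2021 | python/q17.py | GetStationaryInitialVelocitiesX
-- ===== SOURCE A (Python) =====
-- def GetStationaryInitialVelocitiesX(xmin,xmax):
--     dist=0
--     i=0
--     vinits=[]
--     landings=[]
--     while dist <= xmax:
--         i+=1
--         dist=dist+i
--         if dist >= xmin and dist <= xmax:
--             vinits.append(i)
--             landings.append(dist)
--     firstvalids=[]
--     for v0 in vinits:
--         p=0
--         v=v0
--         t=0
--         while True:
--             t+=1
--             p+=v
--             v=max(0,v-1)
--             if p>=xmin and p<=xmax:
--                 firstvalids.append(t)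
--                 break
--     return vinits, landings, firstvalids
-- ===== SOURCE B (Python) =====
-- def GetStationaryInitialVelocitiesX(xmin, xmax):
--     def tri(i):
--         return i * (i + 1) // 2
--
--     def bisect_least(lo, hi, pred):
--         # smallest k in [lo, hi] with pred(k) (pred monotone on [lo, hi]); hi if none below
--         while lo < hi:
--             mid = (lo + hi) // 2
--             if pred(mid):
--                 hi = mid
--             else:
--                 lo = mid + 1
--         return lo
--
--     if xmax < 0:
--         return [], [], []
--     hi = 1
--     while tri(hi) <= xmax:
--         hi *= 2
--     imax = bisect_least(0, hi, lambda i: tri(i) > xmax) - 1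
--     imin = bisect_least(1, imax + 1, lambda i: tri(i) >= xmin)
--     vinits = list(range(imin, imax + 1))
--     landings = [tri(i) for i in vinits]
--     firstvalids = [
--         bisect_least(1, v0, lambda t: t * v0 - tri(t - 1) >= xmin) for v0 in vinits
--     ]
--     return vinits, landings, firstvalids
-- ===== Notes on version B (the rewrite author's own statement) =====
-- stated objective: faster
-- what changed: B replaces A's step-by-step probe simulation (outer distance-accumulation scan and per-velocity while-loop flight simulation) by closed-form triangular-number positions with binary search: a doubling+bisection search for the landing-velocity interval and, for each velocity, a bisection for the first arrival time over the monotone position function.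
import Mathlib
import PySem

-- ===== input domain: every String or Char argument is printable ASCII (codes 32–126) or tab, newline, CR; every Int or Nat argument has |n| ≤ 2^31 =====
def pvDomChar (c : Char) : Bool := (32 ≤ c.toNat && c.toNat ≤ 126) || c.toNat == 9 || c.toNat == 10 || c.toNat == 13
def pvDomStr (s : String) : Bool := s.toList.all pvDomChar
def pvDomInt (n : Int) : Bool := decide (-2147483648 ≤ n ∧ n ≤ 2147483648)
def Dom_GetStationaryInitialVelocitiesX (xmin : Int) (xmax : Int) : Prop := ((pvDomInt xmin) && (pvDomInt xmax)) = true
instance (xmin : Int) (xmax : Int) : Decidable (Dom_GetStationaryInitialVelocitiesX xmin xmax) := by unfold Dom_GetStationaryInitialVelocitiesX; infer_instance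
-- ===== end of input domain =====

-- B replaces A's two simulation loops by binary searches: closed-form triangular
-- positions with bisection for the landing-velocity interval and for each first
-- arrival time (objective: faster, asymptotic).
-- All loops are ported with a Nat fuel parameter that is only a totality guard:
-- the fuel each call site passes provably exceeds the loop's iteration count
-- (see the *_char lemmas below), so it never alters the computed value.

-- triangular number i*(i+1)//2 (used by port B; also the value A's `dist` tracks)
def triB (i : Int) : Int := PySem.Int.floordiv (i * (i + 1)) 2

-- ===== PORT A =====
-- A's first while loop; `i` is Python's loop counter (always ≥ 0, kept as a Nat);
-- the loop runs at most xmax+2 times (dist grows by ≥ 1 per step), ≤ the fuel passed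
def loopA (xmin xmax : Int) : Nat → Int → Nat → List Int → List Int → List Int × List Int
  | 0, _, _, vinits, landings => (vinits, landings)
  | fuel + 1, dist, i, vinits, landings =>
    if dist ≤ xmax then
      let i' : Nat := i + 1
      let dist' : Int := dist + (i' : Int)
      if xmin ≤ dist' ∧ dist' ≤ xmax then
        loopA xmin xmax fuel dist' i' (vinits ++ [(i' : Int)]) (landings ++ [dist'])
      else
        loopA xmin xmax fuel dist' i' vinits landings
    else (vinits, landings)

-- A's inner `while True` loop; on every v0 that A feeds it the loop provably breaks
-- within v0 steps, so the fuel v0+1 passed below is never exhausted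
def innerA (xmin xmax : Int) : Nat → Int → Int → Int → Option Int
  | 0, _, _, _ => none
  | fuel + 1, p, v, t =>
    let t' := t + 1
    let p' := p + v
    let v' := max 0 (v - 1)
    if xmin ≤ p' ∧ p' ≤ xmax then some t' else innerA xmin xmax fuel p' v' t'

def GetStationaryInitialVelocitiesX (xmin : Int) (xmax : Int) : List Int × List Int × List Int :=
  let vl := loopA xmin xmax ((xmax + 1).toNat + 1) 0 0 [] []
  let firstvalids :=
    vl.1.foldl (fun acc v0 => acc ++ [(innerA xmin xmax (v0.toNat + 1) 0 v0 0).getD 0]) []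
  (vl.1, vl.2, firstvalids)

-- ===== PORT B =====
-- B's bisect_least: smallest k in [lo,hi] with pred k (pred monotone), hi if none below;
-- the interval shrinks every step, so fuel (hi-lo).toNat is never exhausted
def bisectLeast (pred : Int → Bool) : Nat → Int → Int → Int
  | 0, lo, _ => lo
  | fuel + 1, lo, hi =>
    if lo < hi then
      let mid := PySem.Int.floordiv (lo + hi) 2
      if pred mid then bisectLeast pred fuel lo mid else bisectLeast pred fuel (mid + 1) hi
    else lo

-- B's doubling loop `while tri(hi) <= xmax: hi *= 2`; hi grows by ≥ 1 per step and the
-- loop requires hi ≤ tri(hi) ≤ xmax, so fuel xmax+1 is never exhausted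
def growHi (xmax : Int) : Nat → Int → Int
  | 0, hi => hi
  | fuel + 1, hi => if triB hi ≤ xmax then growHi xmax fuel (2 * hi) else hi

def GetStationaryInitialVelocitiesX_alt (xmin : Int) (xmax : Int) : List Int × List Int × List Int :=
  if xmax < 0 then ([], [], [])
  else
    let hi := growHi xmax (xmax.toNat + 1) 1
    let imax := bisectLeast (fun i => decide (triB i > xmax)) hi.toNat 0 hi - 1
    let imin := bisectLeast (fun i => decide (triB i ≥ xmin)) (imax.toNat) 1 (imax + 1)
    let vinits := PySem.List.pyRange imin (imax + 1) 1
    let landings := vinits.map triB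
    let firstvalids :=
      vinits.map (fun v0 => bisectLeast (fun t => decide (t * v0 - triB (t - 1) ≥ xmin)) ((v0 - 1).toNat) 1 v0)
    (vinits, landings, firstvalids)

-- ===== PRECONDITION & SPEC =====
def Spec_GetStationaryInitialVelocitiesX (xmin : Int) (xmax : Int) (out : List Int × List Int × List Int) : Prop := out = GetStationaryInitialVelocitiesX_alt xmin xmax
instance (xmin : Int) (xmax : Int) (out : List Int × List Int × List Int) : Decidable (Spec_GetStationaryInitialVelocitiesX xmin xmax out) := by unfold Spec_GetStationaryInitialVelocitiesX; infer_instance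

-- ===== CLAIM (what is proved, stated in full; the proofs are below) =====
def Claim_equal_GetStationaryInitialVelocitiesX : Prop := ∀ (xmin : Int) (xmax : Int), Dom_GetStationaryInitialVelocitiesX xmin xmax → Spec_GetStationaryInitialVelocitiesX xmin xmax (GetStationaryInitialVelocitiesX xmin xmax)

-- ===== LEMMAS AND PROOFS =====

theorem two_mul_triB (i : Int) : 2 * triB i = i * (i + 1) := by
  have he : (i * (i + 1)) % 2 = 0 := Int.even_iff.mp (Int.even_mul_succ_self i)
  have := PySem.Int.floordiv_eq_ediv_of_pos (a := i * (i + 1)) (b := 2) (by norm_num)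
  unfold triB
  omega

theorem le_triB (i : Int) (h : 1 ≤ i) : i ≤ triB i := by
  have h2 := two_mul_triB i
  nlinarith

theorem triB_mono {a b : Int} (h0 : 0 ≤ a) (hab : a ≤ b) : triB a ≤ triB b := by
  have h1 := two_mul_triB a
  have h2 := two_mul_triB b
  nlinarith

theorem triB_succ (i : Int) : triB (i + 1) = triB i + (i + 1) := by
  have h1 := two_mul_triB i
  have h2 := two_mul_triB (i + 1)
  nlinarith

theorem triB_zero : triB 0 = 0 := by
  have := two_mul_triB 0
  omega

-- B's closed-form position after t steps from initial x-velocity v0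
def posB (v0 t : Int) : Int := t * v0 - triB (t - 1)

theorem posB_succ (v0 t : Int) : posB v0 (t + 1) = posB v0 t + (v0 - t) := by
  have h := triB_succ (t - 1)
  unfold posB
  have e : t - 1 + 1 = t := by omega
  rw [e] at h
  have e2 : t + 1 - 1 = t := by omega
  rw [e2]
  linear_combination -h

theorem posB_zero (v0 : Int) : posB v0 0 = 0 := by
  have h1 := two_mul_triB (-1)
  unfold posB
  norm_num at h1 ⊢
  omega

theorem posB_self (v0 : Int) : posB v0 v0 = triB v0 := by
  have h1 := two_mul_triB v0
  have h2 := two_mul_triB (v0 - 1)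
  unfold posB
  nlinarith

theorem posB_mono {v0 a b : Int} (hab : a ≤ b) (hb : b ≤ v0) : posB v0 a ≤ posB v0 b := by
  have h1 := two_mul_triB (a - 1)
  have h2 := two_mul_triB (b - 1)
  unfold posB
  nlinarith [mul_nonneg (sub_nonneg.mpr hab) (by omega : (0:Int) ≤ 2 * v0 - a - b + 1)]

theorem bisectLeast_char (pred : Int → Bool) :
    ∀ fuel : Nat, ∀ lo hi : Int, (hi - lo).toNat ≤ fuel → lo ≤ hi →
    (∀ a b : Int, lo ≤ a → a ≤ b → b < hi → pred b = false → pred a = false) →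
    lo ≤ bisectLeast pred fuel lo hi ∧ bisectLeast pred fuel lo hi ≤ hi ∧
    (∀ k, lo ≤ k → k < bisectLeast pred fuel lo hi → pred k = false) ∧
    (bisectLeast pred fuel lo hi < hi → pred (bisectLeast pred fuel lo hi) = true) := by
  intro fuel
  induction fuel with
  | zero =>
    intro lo hi hn hle mono
    have heq : hi = lo := by omega
    rw [bisectLeast]
    exact ⟨le_refl _, hle, fun k hk hkr => absurd (lt_of_le_of_lt hk hkr) (lt_irrefl _),
      fun h => absurd h (by omega)⟩
  | succ fuel ih =>
    intro lo hi hn hle mono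
    rw [bisectLeast]
    by_cases hlt : lo < hi
    · have hb : lo ≤ PySem.Int.floordiv (lo + hi) 2 ∧ PySem.Int.floordiv (lo + hi) 2 ≤ hi :=
        PySem.Int.floordiv_two_mid_bounds (by omega)
      have hmlt : PySem.Int.floordiv (lo + hi) 2 < hi := by
        rw [PySem.Int.floordiv_lt_iff_lt_mul (by norm_num)]; omega
      rw [if_pos hlt]
      set m := PySem.Int.floordiv (lo + hi) 2 with hm
      by_cases hp : pred m = true
      · rw [if_pos hp]
        obtain ⟨ih1, ih2, ih3, ih4⟩ := ih lo m (by omega) hb.1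
          (fun a b ha hab hb' hf => mono a b ha hab (by omega) hf)
        refine ⟨ih1, by omega, ih3, fun hr => ?_⟩
        rcases lt_or_eq_of_le ih2 with h | h
        · exact ih4 h
        · rwa [h]
      · have hp' : pred m = false := by simpa using hp
        rw [if_neg hp]
        obtain ⟨ih1, ih2, ih3, ih4⟩ := ih (m + 1) hi (by omega) (by omega)
          (fun a b ha hab hb' hf => mono a b (by omega) hab hb' hf)
        refine ⟨by omega, ih2, fun k hk hkr => ?_, ih4⟩
        rcases Int.lt_or_le k (m + 1) with h | h
        · exact mono k m hk (by omega) hmlt hp'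
        · exact ih3 k h hkr
    · rw [if_neg hlt]
      exact ⟨le_refl _, hle, fun k hk hkr => absurd (lt_of_le_of_lt hk hkr) (lt_irrefl _),
        fun h => absurd h hlt⟩

theorem growHi_char (xmax : Int) :
    ∀ fuel : Nat, ∀ hi : Int, (xmax + 1 - hi).toNat ≤ fuel → 1 ≤ hi →
      1 ≤ growHi xmax fuel hi ∧ xmax < triB (growHi xmax fuel hi) := by
  intro fuel
  induction fuel with
  | zero =>
    intro hi hn h1
    have hgt : xmax < triB hi := by
      have := le_triB hi h1
      omega
    rw [growHi]
    exact ⟨h1, hgt⟩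
  | succ fuel ih =>
    intro hi hn h1
    rw [growHi]
    by_cases h : triB hi ≤ xmax
    · have hle := le_triB hi h1
      rw [if_pos h]
      exact ih (2 * hi) (by omega) (by omega)
    · rw [if_neg h]
      exact ⟨h1, by omega⟩

theorem innerA_run (xmin xmax v0 tstar : Int)
    (hts2 : tstar ≤ v0)
    (hge : xmin ≤ posB v0 tstar) (hle : triB v0 ≤ xmax)
    (hmin : ∀ k, 1 ≤ k → k < tstar → posB v0 k < xmin) :
    ∀ fuel : Nat, ∀ t : Int, 0 ≤ t → t < tstar → (tstar - t).toNat ≤ fuel →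
      innerA xmin xmax fuel (posB v0 t) (v0 - t) t = some tstar := by
  intro fuel
  induction fuel with
  | zero => intro t h0 hlt hf; omega
  | succ fuel ih =>
    intro t h0 hlt hf
    have hstep : posB v0 t + (v0 - t) = posB v0 (t + 1) := (posB_succ v0 t).symm
    rw [innerA]
    simp only [hstep]
    by_cases hend : t + 1 = tstar
    · have hcond : xmin ≤ posB v0 (t + 1) ∧ posB v0 (t + 1) ≤ xmax := by
        constructor
        · rw [hend]; exact hge
        · calc posB v0 (t + 1) ≤ posB v0 v0 := posB_mono (by omega) (le_refl _)
            _ = triB v0 := posB_self v0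
            _ ≤ xmax := hle
      rw [if_pos hcond, hend]
    · have hlt' : t + 1 < tstar := by omega
      have hcond : ¬ (xmin ≤ posB v0 (t + 1) ∧ posB v0 (t + 1) ≤ xmax) := by
        intro hc
        exact absurd hc.1 (not_le.mpr (hmin (t + 1) (by omega) hlt'))
      rw [if_neg hcond]
      have hv : max 0 (v0 - t - 1) = v0 - (t + 1) := by omega
      rw [hv]
      exact ih (t + 1) (by omega) hlt' (by omega)

theorem foldl_push_eq_map (f : Int → Int) (xs : List Int) (acc : List Int) :
    xs.foldl (fun acc x => acc ++ [f x]) acc = acc ++ xs.map f := by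
  induction xs generalizing acc with
  | nil => simp
  | cons x xs ihx => simp [List.foldl_cons, ihx, List.append_assoc]

theorem loopA_char (xmin xmax imin imax : Int)
    (h1 : 1 ≤ imin)
    (hmaxle : ∀ j : Int, 0 ≤ j → (triB j ≤ xmax ↔ j ≤ imax))
    (hminge : ∀ j : Int, 1 ≤ j → j ≤ imax → (xmin ≤ triB j ↔ imin ≤ j)) :
    ∀ fuel : Nat, ∀ i : Nat, (imax + 2 - (i : Int)).toNat ≤ fuel → ∀ v l : List Int,
      loopA xmin xmax fuel (triB (i : Int)) i v l =
        (v ++ PySem.List.pyRange (max ((i : Int) + 1) imin) (imax + 1) 1,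
         l ++ (PySem.List.pyRange (max ((i : Int) + 1) imin) (imax + 1) 1).map triB) := by
  intro fuel
  induction fuel with
  | zero =>
    intro i hn v l
    have hbig : imax + 2 ≤ (i : Int) := by omega
    rw [loopA]
    rw [PySem.List.pyRange_one_eq_nil (by omega)]
    simp
  | succ fuel ih =>
    intro i hn v l
    rw [loopA]
    by_cases h : triB (i : Int) ≤ xmax
    · have hile : (i : Int) ≤ imax := (hmaxle (i : Int) (by positivity)).mp h
      rw [if_pos h]
      have hcast : ((i + 1 : Nat) : Int) = (i : Int) + 1 := by push_cast; ring
      simp only [hcast]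
      have hd : triB (i : Int) + ((i : Int) + 1) = triB ((i : Int) + 1) := (triB_succ (i : Int)).symm
      rw [hd]
      by_cases hC : xmin ≤ triB ((i : Int) + 1) ∧ triB ((i : Int) + 1) ≤ xmax
      · have hle2 : (i : Int) + 1 ≤ imax := (hmaxle ((i : Int) + 1) (by positivity)).mp hC.2
        have hge2 : imin ≤ (i : Int) + 1 := (hminge ((i : Int) + 1) (by omega) hle2).mp hC.1
        rw [if_pos hC]
        have := ih (i + 1) (by omega) (v ++ [(i : Int) + 1]) (l ++ [triB ((i : Int) + 1)])
        rw [hcast] at this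
        rw [this]
        have hmax1 : max ((i : Int) + 1) imin = (i : Int) + 1 := by omega
        have hmax2 : max ((i : Int) + 1 + 1) imin = (i : Int) + 1 + 1 := by omega
        rw [hmax1, hmax2]
        rw [PySem.List.pyRange_one_cons (by omega : (i : Int) + 1 < imax + 1)]
        simp [List.append_assoc]
      · rw [if_neg hC]
        have := ih (i + 1) (by omega) v l
        rw [hcast] at this
        rw [this]
        by_cases h2 : (i : Int) + 1 ≤ imax
        · have hlt2 : ¬ xmin ≤ triB ((i : Int) + 1) := by
            intro hx
            exact hC ⟨hx, (hmaxle ((i : Int) + 1) (by positivity)).mpr h2⟩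
          have hgt2 : (i : Int) + 1 < imin := by
            by_contra hcon
            exact hlt2 ((hminge ((i : Int) + 1) (by omega) h2).mpr (by omega))
          have hmax1 : max ((i : Int) + 1) imin = imin := by omega
          have hmax2 : max ((i : Int) + 1 + 1) imin = imin := by omega
          rw [hmax1, hmax2]
        · have hieq : (i : Int) = imax := by omega
          rw [PySem.List.pyRange_one_eq_nil (by omega), PySem.List.pyRange_one_eq_nil (by omega)]
    · have hbig : imax < (i : Int) := by
        by_contra hcon
        exact h ((hmaxle (i : Int) (by positivity)).mpr (by omega))
      rw [if_neg h]
      rw [PySem.List.pyRange_one_eq_nil (by omega)]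
      simp

-- proof-only abbreviations for the three bisection results of port B
def growOf (xmax : Int) : Int := growHi xmax (xmax.toNat + 1) 1

def imaxOf (xmax : Int) : Int :=
  bisectLeast (fun i => decide (triB i > xmax)) (growOf xmax).toNat 0 (growOf xmax) - 1

def iminOf (xmin xmax : Int) : Int :=
  bisectLeast (fun i => decide (triB i ≥ xmin)) ((imaxOf xmax).toNat) 1 (imaxOf xmax + 1)

def fvOf (xmin v0 : Int) : Int :=
  bisectLeast (fun t => decide (t * v0 - triB (t - 1) ≥ xmin)) ((v0 - 1).toNat) 1 v0

theorem altB_eq (xmin xmax : Int) (hneg : ¬ xmax < 0) :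
    GetStationaryInitialVelocitiesX_alt xmin xmax =
      (PySem.List.pyRange (iminOf xmin xmax) (imaxOf xmax + 1) 1,
       (PySem.List.pyRange (iminOf xmin xmax) (imaxOf xmax + 1) 1).map triB,
       (PySem.List.pyRange (iminOf xmin xmax) (imaxOf xmax + 1) 1).map (fvOf xmin)) := by
  unfold GetStationaryInitialVelocitiesX_alt
  rw [if_neg hneg]
  rfl

theorem growOf_char (xmax : Int) (hneg : 0 ≤ xmax) :
    1 ≤ growOf xmax ∧ xmax < triB (growOf xmax) :=
  growHi_char xmax (xmax.toNat + 1) 1 (by omega) (by omega)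

theorem imaxOf_pos (xmax : Int) (hneg : 0 ≤ xmax) : 0 ≤ imaxOf xmax := by
  obtain ⟨hH1, hHgt⟩ := growOf_char xmax hneg
  obtain ⟨c1, c2, c3, c4⟩ := bisectLeast_char (fun i => decide (triB i > xmax))
    (growOf xmax).toNat 0 (growOf xmax) (by omega) (by omega)
    (fun a b ha hab _ hf => by
      simp only [decide_eq_false_iff_not, not_lt] at hf ⊢
      exact le_trans (triB_mono ha hab) hf)
  by_contra hcon
  unfold imaxOf at hcon
  have h0 : bisectLeast (fun i => decide (triB i > xmax)) (growOf xmax).toNat 0 (growOf xmax) = 0 := by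
    omega
  have := c4 (by omega)
  rw [h0] at this
  simp only [decide_eq_true_eq, triB_zero] at this
  omega

theorem imaxOf_char (xmax : Int) (hneg : 0 ≤ xmax) :
    ∀ j : Int, 0 ≤ j → (triB j ≤ xmax ↔ j ≤ imaxOf xmax) := by
  obtain ⟨hH1, hHgt⟩ := growOf_char xmax hneg
  obtain ⟨c1, c2, c3, c4⟩ := bisectLeast_char (fun i => decide (triB i > xmax))
    (growOf xmax).toNat 0 (growOf xmax) (by omega) (by omega)
    (fun a b ha hab _ hf => by
      simp only [decide_eq_false_iff_not, not_lt] at hf ⊢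
      exact le_trans (triB_mono ha hab) hf)
  set r0 := bisectLeast (fun i => decide (triB i > xmax)) (growOf xmax).toNat 0 (growOf xmax)
    with hr0
  have hr0pos : 0 ≤ imaxOf xmax := imaxOf_pos xmax hneg
  have hr0eq : imaxOf xmax = r0 - 1 := by unfold imaxOf; rw [← hr0]
  have hr0true : xmax < triB r0 := by
    rcases lt_or_eq_of_le c2 with h | h
    · have := c4 h
      simpa using this
    · rw [h]; exact hHgt
  intro j hj
  constructor
  · intro hle
    by_contra hcon
    have hjr : r0 ≤ j := by omega
    have := lt_of_lt_of_le hr0true (triB_mono (by omega : (0:Int) ≤ r0) hjr)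
    omega
  · intro hle
    have := c3 j hj (by omega)
    simpa using this

theorem iminOf_bounds (xmin xmax : Int) (hneg : 0 ≤ xmax) :
    1 ≤ iminOf xmin xmax ∧ iminOf xmin xmax ≤ imaxOf xmax + 1 := by
  have h0 := imaxOf_pos xmax hneg
  obtain ⟨c1, c2, _, _⟩ := bisectLeast_char (fun i => decide (triB i ≥ xmin))
    ((imaxOf xmax).toNat) 1 (imaxOf xmax + 1) (by omega) (by omega)
    (fun a b ha hab hb hf => by
      simp only [ge_iff_le, decide_eq_false_iff_not, not_le] at hf ⊢
      exact lt_of_le_of_lt (triB_mono (by omega) hab) hf)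
  exact ⟨c1, c2⟩

theorem iminOf_char (xmin xmax : Int) (hneg : 0 ≤ xmax) :
    ∀ j : Int, 1 ≤ j → j ≤ imaxOf xmax → (xmin ≤ triB j ↔ iminOf xmin xmax ≤ j) := by
  have h0 := imaxOf_pos xmax hneg
  obtain ⟨c1, c2, c3, c4⟩ := bisectLeast_char (fun i => decide (triB i ≥ xmin))
    ((imaxOf xmax).toNat) 1 (imaxOf xmax + 1) (by omega) (by omega)
    (fun a b ha hab hb hf => by
      simp only [ge_iff_le, decide_eq_false_iff_not, not_le] at hf ⊢
      exact lt_of_le_of_lt (triB_mono (by omega) hab) hf)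
  set r1 := bisectLeast (fun i => decide (triB i ≥ xmin)) ((imaxOf xmax).toNat) 1 (imaxOf xmax + 1)
    with hr1
  have hr1eq : iminOf xmin xmax = r1 := by unfold iminOf; rw [← hr1]
  intro j hj1 hj2
  rw [hr1eq]
  constructor
  · intro hle
    by_contra hcon
    have := c3 j hj1 (by omega)
    simp only [ge_iff_le, decide_eq_false_iff_not, not_le] at this
    omega
  · intro hle
    have hp : xmin ≤ triB r1 := by
      have := c4 (by omega)
      simpa using this
    exact le_trans hp (triB_mono (by omega) hle)

theorem fvOf_eq_innerA (xmin xmax v0 : Int) (hv1 : 1 ≤ v0)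
    (htle : triB v0 ≤ xmax) (htge : xmin ≤ triB v0) :
    (innerA xmin xmax (v0.toNat + 1) 0 v0 0).getD 0 = fvOf xmin v0 := by
  obtain ⟨c1, c2, c3, c4⟩ := bisectLeast_char (fun t => decide (t * v0 - triB (t - 1) ≥ xmin))
    ((v0 - 1).toNat) 1 v0 (by omega) hv1
    (fun a b ha hab hb hf => by
      simp only [ge_iff_le, decide_eq_false_iff_not, not_le] at hf ⊢
      have : posB v0 a ≤ posB v0 b := posB_mono hab (by omega)
      unfold posB at this
      omega)
  set tstar := bisectLeast (fun t => decide (t * v0 - triB (t - 1) ≥ xmin)) ((v0 - 1).toNat) 1 v0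
    with hts
  have htseq : fvOf xmin v0 = tstar := by unfold fvOf; rw [← hts]
  have hge : xmin ≤ posB v0 tstar := by
    rcases lt_or_eq_of_le c2 with h | h
    · have := c4 h
      simp only [ge_iff_le, decide_eq_true_eq] at this
      unfold posB
      omega
    · rw [h, posB_self]; exact htge
  have hmin : ∀ k, 1 ≤ k → k < tstar → posB v0 k < xmin := by
    intro k hk1 hk2
    have := c3 k hk1 hk2
    simp only [ge_iff_le, decide_eq_false_iff_not, not_le] at this
    unfold posB
    omega
  have hrun := innerA_run xmin xmax v0 tstar c2 hge htle hmin (v0.toNat + 1) 0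
    (le_refl _) (by omega) (by omega)
  rw [posB_zero, sub_zero] at hrun
  rw [hrun, htseq]
  rfl

-- ===== VERDICT (by name: the statement is the Claim_ definition above) =====
theorem GetStationaryInitialVelocitiesX_spec : Claim_equal_GetStationaryInitialVelocitiesX := by
  intro xmin xmax _
  unfold Spec_GetStationaryInitialVelocitiesX
  by_cases hneg : xmax < 0
  · have hA : GetStationaryInitialVelocitiesX xmin xmax = ([], [], []) := by
      unfold GetStationaryInitialVelocitiesX
      have hf : (xmax + 1).toNat + 1 = 0 + 1 := by omega
      rw [hf, loopA]
      rw [if_neg (by omega : ¬ (0:Int) ≤ xmax)]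
      rfl
    have hB : GetStationaryInitialVelocitiesX_alt xmin xmax = ([], [], []) := by
      unfold GetStationaryInitialVelocitiesX_alt
      rw [if_pos hneg]
    rw [hA, hB]
  · have hpos : 0 ≤ xmax := by omega
    have h0 := imaxOf_pos xmax hpos
    obtain ⟨h1, h2⟩ := iminOf_bounds xmin xmax hpos
    have himx : imaxOf xmax ≤ xmax := by
      by_cases hc : 1 ≤ imaxOf xmax
      · exact le_trans (le_triB _ hc) ((imaxOf_char xmax hpos _ (by omega)).mpr (le_refl _))
      · omega
    have hR := loopA_char xmin xmax (iminOf xmin xmax) (imaxOf xmax) h1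
      (imaxOf_char xmax hpos) (iminOf_char xmin xmax hpos)
      ((xmax + 1).toNat + 1) 0 (by omega) [] []
    simp only [Nat.cast_zero, triB_zero, zero_add, List.nil_append] at hR
    have hmax : max 1 (iminOf xmin xmax) = iminOf xmin xmax := by omega
    rw [hmax] at hR
    have hA : GetStationaryInitialVelocitiesX xmin xmax =
        (PySem.List.pyRange (iminOf xmin xmax) (imaxOf xmax + 1) 1,
         (PySem.List.pyRange (iminOf xmin xmax) (imaxOf xmax + 1) 1).map triB,
         (PySem.List.pyRange (iminOf xmin xmax) (imaxOf xmax + 1) 1).foldl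
           (fun acc v0 => acc ++ [(innerA xmin xmax (v0.toNat + 1) 0 v0 0).getD 0]) []) := by
      unfold GetStationaryInitialVelocitiesX
      rw [hR]
    rw [hA, foldl_push_eq_map, List.nil_append, altB_eq xmin xmax hneg]
    refine congrArg _ (congrArg _ (List.map_congr_left ?_))
    intro v0 hv0
    rw [PySem.List.mem_pyRange_one] at hv0
    have hv1 : 1 ≤ v0 := by omega
    have htle : triB v0 ≤ xmax := (imaxOf_char xmax hpos v0 (by omega)).mpr (by omega)
    have htge : xmin ≤ triB v0 := (iminOf_char xmin xmax hpos v0 hv1 (by omega)).mpr (by omega)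
    exact fvOf_eq_innerA xmin xmax v0 hv1 htle htge
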